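-- pv_equiv track=rewrite | github.com/HyggorFirmino/TC-FASE2_IA | genetic_algorithm_tsp-main/genetic_algorithm.py | calculate_fitness_path
-- ===== SOURCE A (Python) =====
-- def calculate_fitness_path(path, distance_matrix, info_locais):
--     total_distance = 0
--     penalty = 0
--
--     # 1. Calcular Distância
--     for i in range(len(path) - 1):
--         total_distance += distance_matrix[path[i]][path[i+1]]
--
--     # 2. Aplicar Restrição de Prioridade (Exemplo Simplificado)
--     # Se encontrar um item regular antes de um crítico na lista, pune.
--     tem_critico_pendente = sum(1 for p in path if info_locais[p]['tipo'] == 'critico')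
--     for cidade in path:
--         if info_locais[cidade]['tipo'] == 'critico':
--             tem_critico_pendente -= 1
--         elif info_locais[cidade]['tipo'] == 'regular' and tem_critico_pendente > 0:
--             penalty += 1000 # Penalidade pesada
--
--     # 3. Restrição de Autonomia
--     MAX_AUTONOMIA = 20000 # Defina seu limite
--     if total_distance > MAX_AUTONOMIA:
--         penalty += 50000
--
--     return total_distance + penalty
-- ===== SOURCE B (Python) =====
-- def calculate_fitness_path(path, distance_matrix, info_locais):
--     total_distance = sum(distance_matrix[a][b] for a, b in zip(path, path[1:]))
--
--     # Priority penalty: one forward pass keeping the running count of regulars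
--     # and a snapshot of that count taken at each critical; after the loop the
--     # snapshot holds the number of regulars placed before the LAST critical,
--     # each of which costs 1000.
--     regs = 0
--     penalized = 0
--     for cidade in path:
--         tipo = info_locais[cidade]['tipo']
--         if tipo == 'critico':
--             penalized = regs
--         elif tipo == 'regular':
--             regs += 1
--
--     penalty = 1000 * penalized + (50000 if total_distance > 20000 else 0)
--     return total_distance + penalty
-- ===== Notes on version B (the rewrite author's own statement) =====
-- stated objective: simpler
-- what changed: Distance is summed over zip(path, path[1:]) instead of an index loop, and A's two-pass priority block (pre-count criticals, forward scan with a decrementing counter) is replaced by one forward pass that keeps a running count of regulars and snapshots it at each critical, so the snapshot after the loop is the number of regulars before the last critical.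
import Mathlib
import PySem

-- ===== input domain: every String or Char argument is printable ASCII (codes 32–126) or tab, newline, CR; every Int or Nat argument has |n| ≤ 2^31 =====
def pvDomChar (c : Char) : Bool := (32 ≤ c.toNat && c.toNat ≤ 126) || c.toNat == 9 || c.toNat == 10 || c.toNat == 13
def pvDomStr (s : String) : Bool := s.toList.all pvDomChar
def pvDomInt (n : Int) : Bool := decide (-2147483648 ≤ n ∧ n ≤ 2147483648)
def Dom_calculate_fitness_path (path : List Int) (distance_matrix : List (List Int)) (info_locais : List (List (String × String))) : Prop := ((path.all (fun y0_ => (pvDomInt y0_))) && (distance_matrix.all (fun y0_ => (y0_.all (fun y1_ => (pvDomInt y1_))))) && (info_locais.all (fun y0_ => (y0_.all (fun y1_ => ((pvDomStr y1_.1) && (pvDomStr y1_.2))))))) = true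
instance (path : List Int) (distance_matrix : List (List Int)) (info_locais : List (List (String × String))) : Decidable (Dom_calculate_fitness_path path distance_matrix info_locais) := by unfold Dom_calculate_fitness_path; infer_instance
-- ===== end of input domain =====

-- B sums the distance over consecutive pairs (zip) instead of an index loop and
-- replaces A's two-pass priority block (pre-count criticals, forward scan with a
-- decrementing counter) by one forward pass that keeps a running count of
-- regulars and snapshots it at each critical; proved equal on all inputs where
-- the Python A raises no exception (Pre_).

-- shared helper: both Pythons do `info_locais[cidade]['tipo']` — index (possibly
-- negative, Python-style) then first-match lookup of key "tipo"; on Pre_ the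
-- index is in range and the key present, so the defaults never fire.
def pvTipo (info_locais : List (List (String × String))) (p : Int) : String :=
  match ((PySem.List.pyGet? info_locais p).getD []).find? (fun kv => kv.1 == "tipo") with
  | some kv => kv.2
  | none => ""

-- ===== PORT A =====
def calculate_fitness_path (path : List Int) (distance_matrix : List (List Int)) (info_locais : List (List (String × String))) : Int :=
  -- for i in range(len(path) - 1): total_distance += distance_matrix[path[i]][path[i+1]]
  let total_distance :=
    (PySem.List.pyRange 0 ((path.length : Int) - 1) 1).foldl
      (fun td i =>
        td + (PySem.List.pyGet?
                ((PySem.List.pyGet? distance_matrix ((PySem.List.pyGet? path i).getD 0)).getD [])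
                ((PySem.List.pyGet? path (i + 1)).getD 0)).getD 0) 0
  -- tem_critico_pendente = sum(1 for p in path if info_locais[p]['tipo'] == 'critico')
  let tem := path.foldl (fun n p => if pvTipo info_locais p = "critico" then n + 1 else n) (0 : Int)
  -- forward scan with decrementing counter, accumulating (counter, penalty)
  let s := path.foldl
    (fun (s : Int × Int) cidade =>
      if pvTipo info_locais cidade = "critico" then (s.1 - 1, s.2)
      else if pvTipo info_locais cidade = "regular" ∧ s.1 > 0 then (s.1, s.2 + 1000)
      else s) (tem, (0 : Int))
  let penalty := s.2 + (if total_distance > 20000 then 50000 else 0)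
  total_distance + penalty

-- ===== PORT B =====
def calculate_fitness_path_alt (path : List Int) (distance_matrix : List (List Int)) (info_locais : List (List (String × String))) : Int :=
  -- total_distance = sum(distance_matrix[a][b] for a, b in zip(path, path[1:]))
  let total_distance :=
    (path.zip path.tail).foldl
      (fun acc pr =>
        acc + (PySem.List.pyGet? ((PySem.List.pyGet? distance_matrix pr.1).getD []) pr.2).getD 0) 0
  -- one pass with state (regs, penalized): snapshot the regular count at each critical
  let st := path.foldl
    (fun (st : Int × Int) cidade =>
      let tipo := pvTipo info_locais cidade
      if tipo = "critico" then (st.1, st.1)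
      else if tipo = "regular" then (st.1 + 1, st.2)
      else st) ((0 : Int), (0 : Int))
  let penalty := 1000 * st.2 + (if total_distance > 20000 then 50000 else 0)
  total_distance + penalty

-- ===== PRECONDITION & SPEC =====
-- Pre_ excludes exactly the inputs where Python A raises: an IndexError in the
-- distance loop (distance_matrix[path[i]][path[i+1]]) or an IndexError/KeyError
-- looking up info_locais[p]['tipo'].
def Pre_calculate_fitness_path (path : List Int) (distance_matrix : List (List Int)) (info_locais : List (List (String × String))) : Prop :=
  (∀ pr ∈ path.zip path.tail,
      ((PySem.List.pyGet? distance_matrix pr.1).bind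
        (fun row => PySem.List.pyGet? row pr.2)).isSome = true) ∧
  (∀ p ∈ path,
      ((PySem.List.pyGet? info_locais p).bind
        (fun row => row.find? (fun kv => kv.1 == "tipo"))).isSome = true)
instance (path : List Int) (distance_matrix : List (List Int)) (info_locais : List (List (String × String))) : Decidable (Pre_calculate_fitness_path path distance_matrix info_locais) := by unfold Pre_calculate_fitness_path; infer_instance

def pvWitness_calculate_fitness_path : List Int × List (List Int) × (List (List (String × String))) :=
  ([1, 0, 1], [[0, 5], [5, 0]], [[("tipo", "critico")], [("tipo", "regular")]])

def Spec_calculate_fitness_path (path : List Int) (distance_matrix : List (List Int)) (info_locais : List (List (String × String))) (out : Int) : Prop := out = calculate_fitness_path_alt path distance_matrix info_locais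
instance (path : List Int) (distance_matrix : List (List Int)) (info_locais : List (List (String × String))) (out : Int) : Decidable (Spec_calculate_fitness_path path distance_matrix info_locais out) := by unfold Spec_calculate_fitness_path; infer_instance

-- ===== CLAIM (what is proved, stated in full; the proofs are below) =====
def Claim_equal_calculate_fitness_path : Prop := ∀ (path : List Int) (distance_matrix : List (List Int)) (info_locais : List (List (String × String))), Dom_calculate_fitness_path path distance_matrix info_locais → Pre_calculate_fitness_path path distance_matrix info_locais → Spec_calculate_fitness_path path distance_matrix info_locais (calculate_fitness_path path distance_matrix info_locais)

-- ===== LEMMAS AND PROOFS =====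

-- one matrix cell access distance_matrix[a][b] as both ports perform it
def pvCell (m : List (List Int)) (a b : Int) : Int :=
  (PySem.List.pyGet? ((PySem.List.pyGet? m a).getD []) b).getD 0

-- recursive spec of the distance: sum of pvCell over consecutive pairs
def pvDist (m : List (List Int)) : List Int → Int
  | a :: b :: t => pvCell m a b + pvDist m (b :: t)
  | _ => 0

-- number of criticals in the list
def pvCC (info : List (List (String × String))) : List Int → Int
  | [] => 0
  | c :: t => (if pvTipo info c = "critico" then 1 else 0) + pvCC info t

-- is there a critical in the list?
def pvHasC (info : List (List (String × String))) (l : List Int) : Bool :=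
  l.any (fun c => pvTipo info c == "critico")

-- number of regulars that have a critical somewhere after them
def pvN (info : List (List (String × String))) : List Int → Int
  | [] => 0
  | c :: t => (if pvTipo info c = "regular" ∧ pvHasC info t = true then 1 else 0) + pvN info t

-- number of regulars in the list
def pvReg (info : List (List (String × String))) : List Int → Int
  | [] => 0
  | c :: t => (if pvTipo info c = "regular" then 1 else 0) + pvReg info t

theorem pvCC_nonneg (info : List (List (String × String))) (l : List Int) : 0 ≤ pvCC info l := by
  induction l with
  | nil => simp [pvCC]
  | cons c t ih => simp only [pvCC]; split <;> omega

theorem pvCC_pos_iff (info : List (List (String × String))) (l : List Int) :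
    0 < pvCC info l ↔ pvHasC info l = true := by
  induction l with
  | nil => simp [pvCC, pvHasC]
  | cons c t ih =>
    have h := pvCC_nonneg info t
    simp only [pvCC, pvHasC, List.any_cons, Bool.or_eq_true, beq_iff_eq]
    simp only [pvHasC] at ih
    constructor
    · intro hx
      by_cases hc : pvTipo info c = "critico"
      · exact Or.inl hc
      · rw [if_neg hc] at hx
        exact Or.inr (ih.mp (by omega))
    · intro hx
      by_cases hc : pvTipo info c = "critico"
      · rw [if_pos hc]; omega
      · rw [if_neg hc]
        rcases hx with hx | hx
        · exact absurd hx hc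
        · have := ih.mpr hx; omega

theorem pvN_eq_zero (info : List (List (String × String))) (l : List Int)
    (h : pvHasC info l = false) : pvN info l = 0 := by
  induction l with
  | nil => rfl
  | cons c t ih =>
    simp only [pvHasC, List.any_cons, Bool.or_eq_false_iff, beq_eq_false_iff_ne] at h
    have ht : pvHasC info t = false := h.2
    simp [pvN, ht, ih ht]

theorem pv_count_foldl (info : List (List (String × String))) (l : List Int) (n : Int) :
    l.foldl (fun n p => if pvTipo info p = "critico" then n + 1 else n) n = n + pvCC info l := by
  induction l generalizing n with
  | nil => simp [pvCC]
  | cons c t ih =>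
    simp only [List.foldl_cons, pvCC]
    split <;> rw [ih] <;> ring

-- A's forward scan with the decrementing counter yields 1000 per regular-with-a-critical-after
theorem pvA_loop (info : List (List (String × String))) (l : List Int) (pen : Int) :
    (l.foldl
      (fun (s : Int × Int) cidade =>
        if pvTipo info cidade = "critico" then (s.1 - 1, s.2)
        else if pvTipo info cidade = "regular" ∧ s.1 > 0 then (s.1, s.2 + 1000)
        else s) (pvCC info l, pen)).2 = pen + 1000 * pvN info l := by
  induction l generalizing pen with
  | nil => simp [pvN]
  | cons c t ih =>
    simp only [List.foldl_cons]
    by_cases hc : pvTipo info c = "critico"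
    · simp only [if_pos hc]
      have h1 : pvCC info (c :: t) - 1 = pvCC info t := by simp [pvCC, hc]
      have h2 : pvN info (c :: t) = pvN info t := by
        simp only [pvN]
        have : ¬ (pvTipo info c = "regular" ∧ pvHasC info t = true) := by
          rintro ⟨hr, -⟩; rw [hc] at hr; exact absurd hr (by decide)
        simp [this]
      rw [show ((pvCC info (c :: t), pen) : Int × Int).1 - 1 = pvCC info t from h1, h2]
      exact ih pen
    · have hcc : pvCC info (c :: t) = pvCC info t := by simp [pvCC, hc]
      rw [hcc]
      by_cases hr : pvTipo info c = "regular" ∧ pvCC info t > 0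
      · have hhas : pvHasC info t = true := (pvCC_pos_iff info t).mp hr.2
        have h2 : pvN info (c :: t) = 1 + pvN info t := by
          simp [pvN, hr.1, hhas]
        simp only [if_neg hc, if_pos hr, h2]
        rw [ih (pen + 1000)]; ring
      · have h2 : pvN info (c :: t) = pvN info t := by
          simp only [pvN]
          have : ¬ (pvTipo info c = "regular" ∧ pvHasC info t = true) := by
            rintro ⟨h1, h3⟩
            exact hr ⟨h1, (pvCC_pos_iff info t).mpr h3⟩
          simp [this]
        simp only [if_neg hc, if_neg hr, h2]
        exact ih pen

-- B's forward scan: running regular count, snapshotted at each critical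
theorem pvB_loop (info : List (List (String × String))) (l : List Int) (r p : Int) :
    l.foldl
      (fun (st : Int × Int) cidade =>
        let tipo := pvTipo info cidade
        if tipo = "critico" then (st.1, st.1)
        else if tipo = "regular" then (st.1 + 1, st.2)
        else st) (r, p)
    = (r + pvReg info l, if pvHasC info l then r + pvN info l else p) := by
  induction l generalizing r p with
  | nil => simp [pvReg, pvHasC]
  | cons c t ih =>
    simp only [List.foldl_cons]
    by_cases hc : pvTipo info c = "critico"
    · have hne : pvTipo info c ≠ "regular" := by rw [hc]; decide
      have hhas : pvHasC info (c :: t) = true := by simp [pvHasC, hc]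
      have hN : pvN info (c :: t) = pvN info t := by simp [pvN, hne]
      have hR : pvReg info (c :: t) = pvReg info t := by simp [pvReg, hne]
      by_cases ht : pvHasC info t = true
      · simp [hc, ih, hhas, hN, hR, ht]
      · have ht' : pvHasC info t = false := by simpa using ht
        simp [hc, ih, hhas, hN, hR, ht', pvN_eq_zero info t ht']
    · by_cases hreg : pvTipo info c = "regular"
      · have hhas : pvHasC info (c :: t) = pvHasC info t := by simp [pvHasC, hc]
        have hR : pvReg info (c :: t) = 1 + pvReg info t := by simp [pvReg, hreg]
        by_cases ht : pvHasC info t = true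
        · have hN : pvN info (c :: t) = 1 + pvN info t := by simp [pvN, hreg, ht]
          simp [hreg, ih, hhas, hN, hR, ht, Prod.ext_iff]
          omega
        · have ht' : pvHasC info t = false := by simpa using ht
          have hN : pvN info (c :: t) = pvN info t := by simp [pvN, hreg, ht']
          simp [hreg, ih, hhas, hR, ht', Prod.ext_iff]
          omega
      · have hhas : pvHasC info (c :: t) = pvHasC info t := by simp [pvHasC, hc]
        have hN : pvN info (c :: t) = pvN info t := by simp [pvN, hreg]
        have hR : pvReg info (c :: t) = pvReg info t := by simp [pvReg, hreg]
        simp [hc, hreg, ih, hhas, hN, hR]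

-- B's zip fold computes pvDist
theorem pvB_dist (m : List (List Int)) (l : List Int) (s : Int) :
    (l.zip l.tail).foldl
      (fun acc pr => acc + (PySem.List.pyGet? ((PySem.List.pyGet? m pr.1).getD []) pr.2).getD 0) s
    = s + pvDist m l := by
  induction l generalizing s with
  | nil => simp [pvDist]
  | cons a t ih =>
    cases t with
    | nil => simp [pvDist]
    | cons b u =>
      simp only [List.tail_cons] at ih ⊢
      simp only [List.zip_cons_cons, List.foldl_cons, pvDist, pvCell]
      rw [ih]; ring

-- A's index fold (already converted to Nat getElem? form) computes pvDist
theorem pvA_dist_nat (m : List (List Int)) (l : List Int) (s : Int) :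
    (List.range (((l.length : Int)) - 1).toNat).foldl
      (fun td k => td + pvCell m ((l[k]?).getD 0) ((l[k+1]?).getD 0)) s = s + pvDist m l := by
  induction l generalizing s with
  | nil => simp [pvDist]
  | cons a t ih =>
    cases t with
    | nil => simp [pvDist]
    | cons b u =>
      have hn : ((((a :: b :: u).length : Int)) - 1).toNat = u.length + 1 := by
        simp only [List.length_cons]; omega
      rw [hn, List.range_succ_eq_map]
      simp only [List.foldl_cons, List.foldl_map]
      have h0 : ((a :: b :: u)[(0:Nat)]?).getD (0:Int) = a := rfl
      have h1 : ((a :: b :: u)[(0:Nat)+1]?).getD (0:Int) = b := rfl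
      rw [h0, h1]
      have hbody :
          (fun (td : Int) (k : ℕ) =>
            td + pvCell m (((a :: b :: u)[k.succ]?).getD 0) (((a :: b :: u)[k.succ + 1]?).getD 0))
        = (fun (td : Int) (k : ℕ) =>
            td + pvCell m (((b :: u)[k]?).getD 0) (((b :: u)[k+1]?).getD 0)) := by
        funext td k
        simp [Nat.succ_eq_add_one, List.getElem?_cons_succ]
      rw [hbody]
      have hn2 : ((((b :: u).length : Int)) - 1).toNat = u.length := by
        simp only [List.length_cons]; omega
      have h := ih (s + pvCell m a b)
      rw [hn2] at h
      rw [h, show pvDist m (a :: b :: u) = pvCell m a b + pvDist m (b :: u) from rfl]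
      ring

-- convert A's pyRange/pyGet? distance fold to the Nat getElem? form
theorem pvA_dist (m : List (List Int)) (l : List Int) :
    (PySem.List.pyRange 0 ((l.length : Int) - 1) 1).foldl
      (fun td i =>
        td + (PySem.List.pyGet? ((PySem.List.pyGet? m ((PySem.List.pyGet? l i).getD 0)).getD [])
               ((PySem.List.pyGet? l (i + 1)).getD 0)).getD 0) 0 = pvDist m l := by
  rw [PySem.List.pyRange_one, List.foldl_map]
  have hbody :
      (fun (td : Int) (k : ℕ) =>
        td + (PySem.List.pyGet? ((PySem.List.pyGet? m ((PySem.List.pyGet? l (0 + (k:Int))).getD 0)).getD [])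
               ((PySem.List.pyGet? l ((0 + (k:Int)) + 1)).getD 0)).getD 0)
    = (fun (td : Int) (k : ℕ) => td + pvCell m ((l[k]?).getD 0) ((l[k+1]?).getD 0)) := by
    funext td k
    simp only [pvCell, zero_add]
    rw [show ((k:Int)) + 1 = (((k+1 : ℕ)) : Int) from by push_cast; ring,
        PySem.List.pyGet?_natCast, PySem.List.pyGet?_natCast]
  rw [hbody]
  have := pvA_dist_nat m l 0
  simpa using this

-- ===== VERDICT (by name: the statement is the Claim_ definition above) =====
theorem calculate_fitness_path_spec : Claim_equal_calculate_fitness_path := by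
  intro path dm info _hdom _hpre
  unfold Spec_calculate_fitness_path calculate_fitness_path calculate_fitness_path_alt
  simp only
  rw [pv_count_foldl info path 0, zero_add, pvA_loop info path 0,
      pvA_dist dm path, pvB_loop info path 0 0, pvB_dist dm path 0]
  simp only [zero_add]
  by_cases h : pvHasC info path = true
  · simp [h]
  · have h' : pvHasC info path = false := by simpa using h
    simp [h', pvN_eq_zero info path h']
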